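-- pv_equiv track=rewrite | github.com/isaacmartin1/advent-of-code | 2024/day9/part2.py | find_required_positions
-- ===== SOURCE A (Python) =====
-- def find_required_positions(line, value_count_dict, target_key):
--     replacement_list = []
--     file_length = len(value_count_dict[target_key])
--
--     for x in range(len(line)):
--         if line[x] == '.':
--             replacement_list.append(x)
--
--         else:
--             if file_length <= len(replacement_list):
--                 return replacement_list, value_count_dict[target_key]
--             if line[x] == target_key:
--                 return [], []
--             else:
--                 replacement_list = []
-- ===== SOURCE B (Python) =====
-- from itertools import groupby
--
--
-- def find_required_positions(line, value_count_dict, target_key):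
--     file_value = value_count_dict[target_key]
--     file_length = len(file_value)
--     pos = 0
--     run_start = 0
--     run_len = 0
--     for ch, grp in groupby(line):
--         n = sum(1 for _ in grp)
--         if ch == '.':
--             run_start, run_len = pos, n
--         else:
--             if file_length <= run_len:
--                 return list(range(run_start, run_start + run_len)), file_value
--             if ch == target_key:
--                 return [], []
--             run_start, run_len = pos, 0
--         pos += n
-- ===== Notes on version B (the rewrite author's own statement) =====
-- stated objective: idiomatic
-- what changed: B groups the line into maximal runs with itertools.groupby and decides per run (tracking run start/length and a running position) instead of A's per-character scan that appends each dot index to a list.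
-- outside the precondition, e.g. on find_required_positions(['.'], {'a': []}, 'a'): A returns None, B returns None
import Mathlib
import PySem

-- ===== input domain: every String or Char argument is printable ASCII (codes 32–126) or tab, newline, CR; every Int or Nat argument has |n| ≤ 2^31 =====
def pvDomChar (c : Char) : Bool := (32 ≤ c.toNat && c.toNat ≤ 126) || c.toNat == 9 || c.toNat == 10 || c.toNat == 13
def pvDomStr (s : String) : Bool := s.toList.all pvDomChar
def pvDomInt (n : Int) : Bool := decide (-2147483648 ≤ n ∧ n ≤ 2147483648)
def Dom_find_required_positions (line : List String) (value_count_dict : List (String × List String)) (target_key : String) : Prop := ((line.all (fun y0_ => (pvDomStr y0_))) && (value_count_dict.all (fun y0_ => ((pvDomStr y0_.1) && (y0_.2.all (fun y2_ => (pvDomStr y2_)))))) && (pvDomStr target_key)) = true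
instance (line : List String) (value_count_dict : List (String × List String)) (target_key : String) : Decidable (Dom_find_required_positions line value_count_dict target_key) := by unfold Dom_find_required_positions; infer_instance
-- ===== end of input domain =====

-- B replaces A's per-character scan (appending each dot index to a list) by an idiomatic
-- groupby-style pass over maximal runs of identical characters; equivalence proved on Pre_.


-- ===== PORT A =====
-- the for-loop over range(len(line)) with state replacement_list; `none` = the implicit None
def frpLoopA (line : List String) (tk : String) (fl : Nat) (fv : List String)
    (x : Nat) (repl : List Int) : Option (List Int × List String) :=
  if _h : x < line.length then
    if line.getD x "" = "." then frpLoopA line tk fl fv (x + 1) (repl ++ [(x : Int)])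
    else if fl ≤ repl.length then some (repl, fv)
    else if line.getD x "" = tk then some ([], [])
    else frpLoopA line tk fl fv (x + 1) []
  else none
termination_by line.length - x

-- value_count_dict[target_key] (KeyError when missing) and the implicit `return None` are both
-- excluded by Pre_, so the two getD defaults below are never used on Pre_
def find_required_positions (line : List String) (value_count_dict : List (String × List String)) (target_key : String) : List Int × List String :=
  (frpLoopA line target_key (((PySem.Dict.mk value_count_dict).get? target_key).getD []).length
    (((PySem.Dict.mk value_count_dict).get? target_key).getD []) 0 []).getD ([], [])

-- ===== PORT B =====
-- hand port of itertools.groupby over a list of strings (PySem has no groupby):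
-- spanRun counts the leading run of c, groupRuns lists (char, run length) of each maximal run
def spanRun (c : String) : List String → Nat × List String
  | [] => (0, [])
  | x :: xs => if x = c then ((spanRun c xs).1 + 1, (spanRun c xs).2) else (0, x :: xs)

theorem spanRun_length_le (c : String) : ∀ l : List String, (spanRun c l).2.length ≤ l.length
  | [] => le_refl _
  | x :: xs => by
    simp only [spanRun]
    split
    · exact (spanRun_length_le c xs).trans (Nat.le_succ _)
    · simp

def groupRuns : List String → List (String × Nat)
  | [] => []
  | c :: rest => (c, (spanRun c rest).1 + 1) :: groupRuns (spanRun c rest).2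
termination_by l => l.length
decreasing_by simpa using Nat.lt_succ_of_le (spanRun_length_le c rest)

-- list(range(run_start, run_start + run_len))
def runList (rs rl : Nat) : List Int := (List.range rl).map (fun i => ((rs + i : Nat) : Int))

-- B's loop over the groups, with running position pos and current dot run (rs, rl)
def frpLoopB (fv : List String) (fl : Nat) (tk : String) :
    List (String × Nat) → Nat → Nat → Nat → Option (List Int × List String)
  | [], _, _, _ => none
  | (ch, n) :: gs, pos, rs, rl =>
    if ch = "." then frpLoopB fv fl tk gs (pos + n) pos n
    else if fl ≤ rl then some (runList rs rl, fv)
    else if ch = tk then some ([], [])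
    else frpLoopB fv fl tk gs (pos + n) pos 0

def find_required_positions_alt (line : List String) (value_count_dict : List (String × List String)) (target_key : String) : List Int × List String :=
  (frpLoopB (((PySem.Dict.mk value_count_dict).get? target_key).getD [])
    (((PySem.Dict.mk value_count_dict).get? target_key).getD []).length target_key
    (groupRuns line) 0 0 0).getD ([], [])

-- ===== PRECONDITION & SPEC =====
-- length of the maximal dot run at the end of l
def trailingDots (l : List String) : Nat := (l.reverse.takeWhile (fun s => s = ".")).length

-- Pre_ excludes inputs where Python A raises KeyError (target_key not in value_count_dict) and
-- inputs where the loop falls through so A returns the implicit None, not a (list, list) pair.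
def Pre_find_required_positions (line : List String) (value_count_dict : List (String × List String)) (target_key : String) : Prop :=
  ((PySem.Dict.mk value_count_dict).get? target_key).isSome = true ∧
  ∃ i ∈ List.range line.length,
    line.getD i "" ≠ "." ∧
    (line.getD i "" = target_key ∨
      (((PySem.Dict.mk value_count_dict).get? target_key).getD []).length ≤ trailingDots (line.take i))

instance (line : List String) (value_count_dict : List (String × List String)) (target_key : String) : Decidable (Pre_find_required_positions line value_count_dict target_key) := by unfold Pre_find_required_positions; infer_instance

def pvWitness_find_required_positions : List String × (List (String × List String)) × String :=
  ([".", "a"], [("a", ["a"])], "a")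

def Spec_find_required_positions (line : List String) (value_count_dict : List (String × List String)) (target_key : String) (out : List Int × List String) : Prop := out = find_required_positions_alt line value_count_dict target_key
instance (line : List String) (value_count_dict : List (String × List String)) (target_key : String) (out : List Int × List String) : Decidable (Spec_find_required_positions line value_count_dict target_key out) := by unfold Spec_find_required_positions; infer_instance

-- ===== CLAIM (what is proved, stated in full; the proofs are below) =====
def Claim_equal_find_required_positions : Prop := ∀ (line : List String) (value_count_dict : List (String × List String)) (target_key : String), Dom_find_required_positions line value_count_dict target_key → Pre_find_required_positions line value_count_dict target_key → Spec_find_required_positions line value_count_dict target_key (find_required_positions line value_count_dict target_key)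

-- ===== LEMMAS AND PROOFS =====

-- structural (suffix-list) version of A's index loop, used only in the proof
def loopA' (tk : String) (fl : Nat) (fv : List String) :
    List String → Nat → List Int → Option (List Int × List String)
  | [], _, _ => none
  | c :: rest, x, repl =>
    if c = "." then loopA' tk fl fv rest (x + 1) (repl ++ [(x : Int)])
    else if fl ≤ repl.length then some (repl, fv)
    else if c = tk then some ([], [])
    else loopA' tk fl fv rest (x + 1) []

theorem frpLoopA_eq_loopA' (line : List String) (tk : String) (fl : Nat) (fv : List String) :
    ∀ n x repl, line.length - x ≤ n →
      frpLoopA line tk fl fv x repl = loopA' tk fl fv (line.drop x) x repl := by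
  intro n
  induction n with
  | zero =>
    intro x repl h
    have hx : line.length ≤ x := by omega
    rw [frpLoopA, dif_neg (by omega), List.drop_eq_nil_of_le hx, loopA']
  | succ n ih =>
    intro x repl h
    by_cases hx : x < line.length
    · have hdrop : line.drop x = line.getD x "" :: line.drop (x + 1) := by
        rw [List.drop_eq_getElem_cons hx, List.getD_eq_getElem line "" hx]
      rw [frpLoopA, dif_pos hx, hdrop, loopA']
      by_cases h1 : line.getD x "" = "."
      · rw [if_pos h1, if_pos h1, ih (x + 1) _ (by omega)]
      · rw [if_neg h1, if_neg h1]
        by_cases h2 : fl ≤ repl.length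
        · rw [if_pos h2, if_pos h2]
        · rw [if_neg h2, if_neg h2]
          by_cases h3 : line.getD x "" = tk
          · rw [if_pos h3, if_pos h3]
          · rw [if_neg h3, if_neg h3, ih (x + 1) _ (by omega)]
    · rw [frpLoopA, dif_neg hx, List.drop_eq_nil_of_le (by omega), loopA']

theorem runList_length (rs rl : Nat) : (runList rs rl).length = rl := by
  simp [runList]

theorem runList_append (rs rl : Nat) :
    runList rs rl ++ [((rs + rl : Nat) : Int)] = runList rs (rl + 1) := by
  simp [runList, List.range_succ]

-- A consumes a block of k dots by appending their indices
theorem loopA'_dots (tk : String) (fl : Nat) (fv : List String) :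
    ∀ (k : Nat) (r : List String) (x rs rl : Nat), rs + rl = x →
      loopA' tk fl fv (List.replicate k "." ++ r) x (runList rs rl) =
        loopA' tk fl fv r (x + k) (runList rs (rl + k)) := by
  intro k
  induction k with
  | zero => intro r x rs rl _; simp
  | succ k ih =>
    intro r x rs rl hx
    rw [List.replicate_succ, List.cons_append, loopA', if_pos rfl]
    have : runList rs rl ++ [(x : Int)] = runList rs (rl + 1) := by
      rw [← hx]; exact runList_append rs rl
    rw [this, ih r (x + 1) rs (rl + 1) (by omega),
      show x + 1 + k = x + (k + 1) from by omega, show rl + 1 + k = rl + (k + 1) from by omega]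

-- A consumes a block of k copies of a non-dot, non-target char by resetting each time
theorem loopA'_nondots (tk : String) (fl : Nat) (fv : List String) (c : String)
    (hfl : fl ≠ 0) (hc : c ≠ ".") (hct : c ≠ tk) :
    ∀ (k : Nat) (r : List String) (x : Nat),
      loopA' tk fl fv (List.replicate k c ++ r) x [] = loopA' tk fl fv r (x + k) [] := by
  intro k
  induction k with
  | zero => intro r x; simp
  | succ k ih =>
    intro r x
    rw [List.replicate_succ, List.cons_append, loopA', if_neg hc,
      if_neg (by simp only [List.length_nil]; omega), if_neg hct, ih r (x + 1)]
    congr 1; omega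

theorem spanRun_decomp (c : String) : ∀ l : List String,
    l = List.replicate (spanRun c l).1 c ++ (spanRun c l).2 := by
  intro l
  induction l with
  | nil => simp [spanRun]
  | cons x xs ih =>
    by_cases h : x = c
    · simp only [spanRun, if_pos h, List.replicate_succ, List.cons_append]
      rw [← ih, h]
    · simp [spanRun, if_neg h]

theorem spanRun_head (c : String) : ∀ l : List String, (spanRun c l).2.head? ≠ some c := by
  intro l
  induction l with
  | nil => simp [spanRun]
  | cons x xs ih =>
    by_cases h : x = c
    · simpa [spanRun, if_pos h] using ih
    · simp [spanRun, h]

-- main lemma: A's structural loop agrees with B's per-group loop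
theorem loopA'_eq_loopB (tk : String) (fl : Nat) (fv : List String) :
    ∀ (ls : List String) (x rs rl : Nat),
      (rl = 0 ∨ (rs + rl = x ∧ ls.head? ≠ some ".")) →
      loopA' tk fl fv ls x (runList rs rl) = frpLoopB fv fl tk (groupRuns ls) x rs rl := by
  intro ls
  induction ls using groupRuns.induct with
  | case1 =>
    intro x rs rl _
    rw [groupRuns, loopA', frpLoopB]
  | case2 c rest ih =>
    intro x rs rl hinv
    have hdec := spanRun_decomp c rest
    have hhead := spanRun_head c rest
    rw [groupRuns, frpLoopB]
    by_cases hc : c = "."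
    · -- dot group: invariant forces rl = 0
      have hrl : rl = 0 := by
        rcases hinv with h | ⟨_, h⟩
        · exact h
        · exact absurd (by rw [hc]; rfl) h
      subst hrl
      have h0 : runList rs 0 = runList x 0 := by simp [runList]
      rw [if_pos hc, h0]
      have hblock :
          loopA' tk fl fv (c :: rest) x (runList x 0) =
            loopA' tk fl fv (spanRun c rest).2 (x + ((spanRun c rest).1 + 1))
              (runList x (0 + ((spanRun c rest).1 + 1))) := by
        have : c :: rest =
            List.replicate ((spanRun c rest).1 + 1) c ++ (spanRun c rest).2 := by
          rw [List.replicate_succ, List.cons_append]; exact congrArg (c :: ·) hdec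
        rw [this, hc]
        exact loopA'_dots tk fl fv ((spanRun "." rest).1 + 1) _ x x 0 (by omega)
      rw [hblock]
      have := ih (x + ((spanRun c rest).1 + 1)) x ((spanRun c rest).1 + 1)
        (Or.inr ⟨rfl, by rw [← hc]; exact hhead⟩)
      simpa using this
    · -- non-dot group: one step of A decides; rest of the group only resets
      rw [loopA', if_neg hc, if_neg hc, runList_length]
      by_cases h1 : fl ≤ rl
      · rw [if_pos h1, if_pos h1]
      · rw [if_neg h1, if_neg h1]
        by_cases h2 : c = tk
        · rw [if_pos h2, if_pos h2]
        · rw [if_neg h2, if_neg h2]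
          have hfl : fl ≠ 0 := by omega
          have hrest :
              loopA' tk fl fv rest (x + 1) ([] : List Int) =
                loopA' tk fl fv (spanRun c rest).2 (x + 1 + (spanRun c rest).1) [] := by
            conv_lhs => rw [hdec]
            exact loopA'_nondots tk fl fv c hfl hc h2 (spanRun c rest).1 _ (x + 1)
          rw [hrest, show x + 1 + (spanRun c rest).1 = x + ((spanRun c rest).1 + 1) from by omega]
          have h3 := ih (x + ((spanRun c rest).1 + 1)) x 0 (Or.inl rfl)
          simpa [runList] using h3

theorem ports_agree (line : List String) (value_count_dict : List (String × List String))
    (target_key : String) :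
    find_required_positions line value_count_dict target_key =
      find_required_positions_alt line value_count_dict target_key := by
  unfold find_required_positions find_required_positions_alt
  congr 1
  rw [frpLoopA_eq_loopA' line target_key _ _ line.length 0 [] (by omega), List.drop_zero]
  have h2 := loopA'_eq_loopB target_key
    (((PySem.Dict.mk value_count_dict).get? target_key).getD []).length
    (((PySem.Dict.mk value_count_dict).get? target_key).getD []) line 0 0 0 (Or.inl rfl)
  simpa [runList] using h2

-- ===== VERDICT (by name: the statement is the Claim_ definition above) =====
theorem find_required_positions_spec : Claim_equal_find_required_positions := by
  intro line value_count_dict target_key _ _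
  unfold Spec_find_required_positions
  exact ports_agree line value_count_dict target_key
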